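-- pv_equiv track=rewrite | github.com/MaximusPrimeForever/DLSS-Downloader | utils.py | get_specific_dlss_version
-- ===== SOURCE A (Python) =====
-- def get_specific_dlss_version(dlss_records: dict, version_or_hash: str):
--     for dlss_version in dlss_records:
--         if dlss_version["version"] == version_or_hash:
--             return dlss_version
--
--     for dlss_version in dlss_records:
--         if dlss_version["md5_hash"] == version_or_hash:
--             return dlss_version
--
--     return None
-- ===== SOURCE B (Python) =====
-- def get_specific_dlss_version(dlss_records: dict, version_or_hash: str):
--     hash_match = None
--     for record in dlss_records:
--         if record["version"] == version_or_hash: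
--             return record
--         if hash_match is None and record.get("md5_hash") == version_or_hash:
--             hash_match = record
--     return hash_match
-- ===== Notes on version B (the rewrite author's own statement) =====
-- stated objective: simpler
-- what changed: Replaces A's two sequential scans with a single pass that returns immediately on a version match and remembers the first hash match (via .get) as a fallback returned after the loop.
import Mathlib
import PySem

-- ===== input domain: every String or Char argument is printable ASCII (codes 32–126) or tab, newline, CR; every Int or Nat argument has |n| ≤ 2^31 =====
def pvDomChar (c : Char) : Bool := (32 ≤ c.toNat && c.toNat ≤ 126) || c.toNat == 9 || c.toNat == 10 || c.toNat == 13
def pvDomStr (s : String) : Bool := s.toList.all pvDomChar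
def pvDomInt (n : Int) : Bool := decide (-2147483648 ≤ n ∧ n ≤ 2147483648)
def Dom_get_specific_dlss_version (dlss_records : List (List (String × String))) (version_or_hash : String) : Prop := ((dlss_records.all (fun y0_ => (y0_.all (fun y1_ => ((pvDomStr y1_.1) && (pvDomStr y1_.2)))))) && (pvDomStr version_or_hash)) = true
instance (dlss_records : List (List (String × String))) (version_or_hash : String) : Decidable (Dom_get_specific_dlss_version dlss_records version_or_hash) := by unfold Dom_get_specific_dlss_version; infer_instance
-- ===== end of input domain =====

-- B replaces A's two sequential scans with a single pass that remembers the first hash match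
-- (read with .get, so a missing "md5_hash" never raises) as a fallback (simpler, one traversal).

-- ===== PORT A =====
-- first loop of A: return the first record whose "version" equals version_or_hash
def aVersionLoop : List (List (String × String)) → String → Option (List (String × String))
  | [], _ => none
  | r :: rest, v => if r.lookup "version" == some v then some r else aVersionLoop rest v

-- second loop of A: return the first record whose "md5_hash" equals version_or_hash
def aHashLoop : List (List (String × String)) → String → Option (List (String × String))
  | [], _ => none
  | r :: rest, v => if r.lookup "md5_hash" == some v then some r else aHashLoop rest v

def get_specific_dlss_version (dlss_records : List (List (String × String))) (version_or_hash : String) : Option (List (String × String)) :=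
  match aVersionLoop dlss_records version_or_hash with
  | some r => some r
  | none => aHashLoop dlss_records version_or_hash

-- ===== PORT B =====
-- single pass with a hash_match accumulator; record.get("md5_hash") == v is lookup == some v
def bLoop : List (List (String × String)) → String → Option (List (String × String)) → Option (List (String × String))
  | [], _, hash_match => hash_match
  | r :: rest, v, hash_match =>
    if r.lookup "version" == some v then some r
    else bLoop rest v (if hash_match == none && r.lookup "md5_hash" == some v then some r else hash_match)

def get_specific_dlss_version_alt (dlss_records : List (List (String × String))) (version_or_hash : String) : Option (List (String × String)) :=
  bLoop dlss_records version_or_hash none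

-- ===== PRECONDITION & SPEC =====
-- Pre_ excludes exactly the inputs on which the Python A raises KeyError: a record missing the
-- "version" key before the first version match, or — when no version match exists — a record
-- missing the "md5_hash" key before the first hash match (read by A's second loop).
def Pre_get_specific_dlss_version (dlss_records : List (List (String × String))) (version_or_hash : String) : Prop :=
  (∀ r ∈ dlss_records.takeWhile (fun r => !(r.lookup "version" == some version_or_hash)),
      (r.lookup "version").isSome) ∧
  ((∀ r ∈ dlss_records, ¬(r.lookup "version" = some version_or_hash)) →
    ∀ r ∈ dlss_records.takeWhile (fun r => !(r.lookup "md5_hash" == some version_or_hash)),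
      (r.lookup "md5_hash").isSome)

instance (dlss_records : List (List (String × String))) (version_or_hash : String) : Decidable (Pre_get_specific_dlss_version dlss_records version_or_hash) := by unfold Pre_get_specific_dlss_version; infer_instance

def pvWitness_get_specific_dlss_version : (List (List (String × String))) × String :=
  ([[("version", "1.0"), ("md5_hash", "ab")], [("version", "2.0"), ("md5_hash", "cd")]], "ab")

def Spec_get_specific_dlss_version (dlss_records : List (List (String × String))) (version_or_hash : String) (out : Option (List (String × String))) : Prop := out = get_specific_dlss_version_alt dlss_records version_or_hash
instance (dlss_records : List (List (String × String))) (version_or_hash : String) (out : Option (List (String × String))) : Decidable (Spec_get_specific_dlss_version dlss_records version_or_hash out) := by unfold Spec_get_specific_dlss_version; infer_instance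

-- ===== CLAIM (what is proved, stated in full; the proofs are below) =====
def Claim_equal_get_specific_dlss_version : Prop := ∀ (dlss_records : List (List (String × String))) (version_or_hash : String), Dom_get_specific_dlss_version dlss_records version_or_hash → Pre_get_specific_dlss_version dlss_records version_or_hash → Spec_get_specific_dlss_version dlss_records version_or_hash (get_specific_dlss_version dlss_records version_or_hash)

-- ===== LEMMAS AND PROOFS =====

-- B's loop with accumulator hm equals: first version match, else hm, else first hash match.
theorem bLoop_eq (rs : List (List (String × String))) (v : String) (hm : Option (List (String × String))) :
    bLoop rs v hm =
      match aVersionLoop rs v with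
      | some r => some r
      | none => match hm with
        | some h => some h
        | none => aHashLoop rs v := by
  induction rs generalizing hm with
  | nil => cases hm <;> simp [bLoop, aVersionLoop, aHashLoop]
  | cons r rest ih =>
    simp only [bLoop, aVersionLoop, aHashLoop]
    by_cases hv : (r.lookup "version" == some v) = true
    · simp [hv]
    · simp only [hv, if_false, Bool.false_eq_true, ih]
      cases hm with
      | some h => simp
      | none =>
        by_cases hh : (r.lookup "md5_hash" == some v) = true
        · simp [hh]
        · simp [hh]

-- ===== VERDICT (by name: the statements are the Claim_ definitions above) =====
theorem get_specific_dlss_version_spec : Claim_equal_get_specific_dlss_version := by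
  intro rs v _ _
  unfold Spec_get_specific_dlss_version get_specific_dlss_version get_specific_dlss_version_alt
  rw [bLoop_eq]
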